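-- pv_equiv track=rewrite | github.com/sangketkit01/Python-Lab | Lab/Lab11/Lab11_03.py | countColor
-- ===== SOURCE A (Python) =====
-- from typing import Tuple
--
-- def countColor(color : str) -> Tuple[dict,str]:
--     colorList = color.split("-")
--     newSentence = "-".join(sorted(colorList))
--     colorDict = {}
--     for i in colorList :
--         if i not in colorDict :
--             colorDict[i] = 1
--         else :
--             colorDict[i] += 1
--     return {k:v for k,v in sorted(colorDict.items())},newSentence
-- ===== SOURCE B (Python) =====
-- from typing import Tuple
--
-- def countColor(color: str) -> Tuple[dict, str]:
--     s = sorted(color.split("-"))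
--     newSentence = "-".join(s)
--     colorDict = {}
--     i = 0
--     n = len(s)
--     while i < n:                    # equal colors are adjacent in the sorted list
--         j = i + 1
--         while j < n and s[j] == s[i]:
--             j += 1
--         colorDict[s[i]] = j - i     # keys are produced already in sorted order
--         i = j
--     return colorDict, newSentence
-- ===== Notes on version B (the rewrite author's own statement) =====
-- stated objective: alternative
-- what changed: Instead of counting with a dict membership loop over the unsorted list and then sorting dict.items(), B sorts once and run-length-scans the sorted list, so the counts emerge already in sorted key order and no second sort is needed.
import Mathlib
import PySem

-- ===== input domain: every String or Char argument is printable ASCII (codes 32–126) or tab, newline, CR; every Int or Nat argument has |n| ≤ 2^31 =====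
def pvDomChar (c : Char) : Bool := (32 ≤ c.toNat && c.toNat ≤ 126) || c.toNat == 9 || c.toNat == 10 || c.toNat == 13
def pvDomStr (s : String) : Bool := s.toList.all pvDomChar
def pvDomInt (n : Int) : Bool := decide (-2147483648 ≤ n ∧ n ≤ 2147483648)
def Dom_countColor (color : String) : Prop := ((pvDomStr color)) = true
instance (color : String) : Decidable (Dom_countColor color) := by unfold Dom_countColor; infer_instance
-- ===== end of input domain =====

-- B replaces A's dict-membership counting loop + sort of dict.items() by one sort followed by a
-- run-length scan of the sorted list (counts emerge already in sorted key order); same cost class.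

-- ===== PORT A =====
def countColor (color : String) : (List (String × Int)) × String :=
  let colorList := (PySem.Str.split? color "-").getD []  -- sep "-" ≠ "", so split? is always `some`
  let newSentence := PySem.Str.join "-" (PySem.List.sorted colorList (fun x => x))
  let colorDict := colorList.foldl
    (fun d i => if d.contains i = false then d.insert i 1 else d.insert i (d.getD i 0 + 1))
    PySem.Dict.empty
  -- {k:v for k,v in sorted(colorDict.items())}: keys are distinct, so the rebuilt dict's items
  -- are exactly that sorted list (tuple comparison = lexicographic on (key, value))
  (PySem.List.sorted2 colorDict.items (fun p => p.1) (fun p => p.2), newSentence)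

-- ===== PORT B =====
-- Source B's while-loop run-length scan: each outer-loop step consumes one maximal run s[i..j);
-- here that step is recursion on the remaining suffix (takeWhile = the inner `while j` scan).
def pvRuns : List String → List (String × Int)
  | [] => []
  | h :: t =>
    (h, 1 + ((t.takeWhile (fun x => x == h)).length : Int)) :: pvRuns (t.dropWhile (fun x => x == h))
termination_by s => s.length
decreasing_by simpa using Nat.lt_succ_of_le (List.length_dropWhile_le _ t)

def countColor_alt (color : String) : (List (String × Int)) × String :=
  let s := PySem.List.sorted ((PySem.Str.split? color "-").getD []) (fun x => x)
  (pvRuns s, PySem.Str.join "-" s)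

-- ===== PRECONDITION & SPEC =====
def Spec_countColor (color : String) (out : (List (String × Int)) × String) : Prop := out = countColor_alt color
instance (color : String) (out : (List (String × Int)) × String) : Decidable (Spec_countColor color out) := by unfold Spec_countColor; infer_instance

-- ===== CLAIM (what is proved, stated in full; the proofs are below) =====
def Claim_equal_countColor : Prop := ∀ (color : String), Dom_countColor color → Spec_countColor color (countColor color)

-- ===== LEMMAS AND PROOFS =====

-- A's counting loop is collections.Counter
lemma pv_dict_eq (lst : List String) :
    lst.foldl
      (fun d i => if d.contains i = false then d.insert i 1 else d.insert i (d.getD i 0 + 1))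
      PySem.Dict.empty = PySem.Dict.counter lst := by
  rw [← PySem.Dict.foldl_insert_getD_add_one_eq_counter]
  have hf : (fun (d : PySem.Dict String Int) i =>
      if d.contains i = false then d.insert i 1 else d.insert i (d.getD i 0 + 1))
      = fun d x => d.insert x (d.getD x 0 + 1) := by
    funext d i
    by_cases h : d.contains i = false
    · simp [h, PySem.Dict.getD_of_not_contains d 0 h]
    · simp [h]
  rw [hf]

lemma pv_insertBy_congr {α : Type} (b1 b2 : α → α → Bool) (x : α) (acc : List α)
    (h : ∀ y ∈ acc, b1 x y = b2 x y) :
    PySem.List.insertBy b1 x acc = PySem.List.insertBy b2 x acc := by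
  induction acc with
  | nil => rfl
  | cons y ys ih =>
    simp only [PySem.List.insertBy]
    rw [h y (by simp)]
    by_cases hb : b2 x y = true
    · simp [hb]
    · simp only [hb]
      rw [ih (fun z hz => h z (by simp [hz]))]

lemma pv_foldl_insertBy_congr {α : Type} (b1 b2 : α → α → Bool) (xs : List α) (acc : List α)
    (h : ∀ a ∈ xs, ∀ y, (y ∈ acc ∨ y ∈ xs) → b1 a y = b2 a y) :
    xs.foldl (fun acc x => PySem.List.insertBy b1 x acc) acc
      = xs.foldl (fun acc x => PySem.List.insertBy b2 x acc) acc := by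
  induction xs generalizing acc with
  | nil => rfl
  | cons x xs ih =>
    simp only [List.foldl_cons]
    rw [pv_insertBy_congr b1 b2 x acc (fun y hy => h x (by simp) y (Or.inl hy))]
    exact ih _ (fun a ha y hy => h a (by simp [ha]) y (by
      rcases hy with hy | hy
      · rw [PySem.List.mem_insertBy] at hy
        rcases hy with rfl | hy
        · exact Or.inr (by simp)
        · exact Or.inl hy
      · exact Or.inr (by simp [hy])))

-- on a list with pairwise-distinct first components, sorting by the tuple key (fst, snd)
-- is sorting by fst alone
lemma pv_sorted2_eq_sorted (xs : List (String × Int))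
    (hinj : ∀ a ∈ xs, ∀ b ∈ xs, a.1 = b.1 → a = b) :
    PySem.List.sorted2 xs (fun p => p.1) (fun p => p.2)
      = PySem.List.sorted xs (fun p => p.1) := by
  rw [PySem.List.sorted_eq_foldl_insertBy]
  show xs.foldl (fun acc x => PySem.List.insertBy
      (fun a b => decide (a.1 < b.1) || (!decide (b.1 < a.1) && decide (a.2 < b.2))) x acc) []
    = xs.foldl (fun acc x => PySem.List.insertBy (fun a b => decide (a.1 < b.1)) x acc) []
  apply pv_foldl_insertBy_congr
  intro a ha y hy
  rcases hy with hy | hy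
  · simp at hy
  · by_cases hk : a.1 = y.1
    · have : a = y := hinj a ha y hy hk
      subst this
      simp
    · rcases lt_or_gt_of_ne hk with hlt | hgt
      · simp [hlt]
      · simp [not_lt_of_gt hgt, hgt]

-- on a sorted list whose elements all dominate h, everything surviving `dropWhile (== h)` exceeds h
lemma pv_dropWhile_gt (h : String) : ∀ (t : List String), (∀ x ∈ t, h ≤ x) → t.Pairwise (· ≤ ·) →
    ∀ x ∈ t.dropWhile (fun x => x == h), h < x := by
  intro t
  induction t with
  | nil => intro _ _ x hx; simp at hx
  | cons y ys ih =>
    intro hle hpw x hx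
    by_cases hy : (y == h) = true
    · rw [List.dropWhile_cons_of_pos (p := fun x => x == h) hy] at hx
      exact ih (fun z hz => hle z (by simp [hz])) (List.pairwise_cons.mp hpw).2 x hx
    · rw [List.dropWhile_cons_of_neg (p := fun x => x == h) hy] at hx
      have hyh : y ≠ h := by simpa using hy
      have hhy : h < y := lt_of_le_of_ne (hle y (by simp)) (Ne.symm hyh)
      rcases List.mem_cons.mp hx with rfl | hx'
      · exact hhy
      · exact lt_of_lt_of_le hhy ((List.pairwise_cons.mp hpw).1 x hx')

-- characterisation of the run-length scan on a sorted list
lemma pv_runs_spec : ∀ (s : List String), s.Pairwise (· ≤ ·) →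
    (pvRuns s).Pairwise (fun a b => a.1 < b.1)
    ∧ (∀ p : String × Int, p ∈ pvRuns s ↔ p.1 ∈ s ∧ p.2 = (List.count p.1 s : Int)) := by
  intro s
  induction s using pvRuns.induct with
  | case1 => intro _; simp [pvRuns]
  | case2 h t ih =>
    intro hs
    have hht : ∀ x ∈ t, h ≤ x := (List.pairwise_cons.mp hs).1
    have ht : t.Pairwise (· ≤ ·) := (List.pairwise_cons.mp hs).2
    have hd : (t.dropWhile (fun x => x == h)).Pairwise (· ≤ ·) :=
      ht.sublist (List.dropWhile_sublist _)
    have hlt : ∀ x ∈ t.dropWhile (fun x => x == h), h < x := pv_dropWhile_gt h t hht ht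
    have htw : ∀ x ∈ t.takeWhile (fun x => x == h), x = h := by
      intro x hx
      have := List.mem_takeWhile_imp hx
      simpa using this
    have hsplit : ∀ k : String, List.count k t
        = List.count k (t.takeWhile (fun x => x == h))
          + List.count k (t.dropWhile (fun x => x == h)) := by
      intro k
      conv_lhs => rw [← List.takeWhile_append_dropWhile (p := fun x => x == h) (l := t)]
      rw [List.count_append]
    -- count of h in the whole list
    have hcount_h : List.count h (h :: t) = (t.takeWhile (fun x => x == h)).length + 1 := by
      have h1 : List.count h (t.takeWhile (fun x => x == h))
          = (t.takeWhile (fun x => x == h)).length :=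
        List.count_eq_length.mpr (fun b hb => (htw b hb).symm)
      have h2 : List.count h (t.dropWhile (fun x => x == h)) = 0 :=
        List.count_eq_zero.mpr (fun hmem => lt_irrefl h (hlt h hmem))
      rw [List.count_cons_self, hsplit h, h1, h2]
    -- count of a strictly larger element lives entirely in the dropWhile suffix
    have hcount_gt : ∀ k, h < k →
        List.count k (h :: t) = List.count k (t.dropWhile (fun x => x == h)) := by
      intro k hk
      have h0 : List.count k (t.takeWhile (fun x => x == h)) = 0 :=
        List.count_eq_zero.mpr (fun hmem => absurd (htw k hmem) (Ne.symm (ne_of_lt hk)))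
      rw [List.count_cons_of_ne (ne_of_lt hk), hsplit k, h0]
      omega
    obtain ⟨ihpw, ihmem⟩ := ih hd
    constructor
    · rw [pvRuns]
      refine List.pairwise_cons.mpr ⟨?_, ihpw⟩
      intro q hq
      exact hlt q.1 ((ihmem q).mp hq).1
    · intro p
      rw [pvRuns]
      simp only [List.mem_cons]
      constructor
      · rintro (rfl | hp)
        · refine ⟨Or.inl rfl, ?_⟩
          simp only [hcount_h]
          push_cast
          ring
        · obtain ⟨hp1, hp2⟩ := (ihmem p).mp hp
          have hp1t : p.1 ∈ t := (List.dropWhile_sublist _).mem hp1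
          refine ⟨Or.inr hp1t, ?_⟩
          rw [hcount_gt p.1 (hlt p.1 hp1)]
          exact hp2
      · rintro ⟨hp1, hp2⟩
        by_cases hph : p.1 = h
        · left
          have : p.2 = 1 + ((t.takeWhile (fun x => x == h)).length : Int) := by
            rw [hp2, hph, hcount_h]; push_cast; ring
          calc p = (p.1, p.2) := rfl
            _ = (h, 1 + ((t.takeWhile (fun x => x == h)).length : Int)) := by rw [hph, this]
        · right
          have hp1t : p.1 ∈ t := by
            rcases hp1 with e | e
            · exact absurd e hph
            · exact e
          have hp1d : p.1 ∈ t.dropWhile (fun x => x == h) := by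
            have hmm : p.1 ∈ t.takeWhile (fun x => x == h) ++ t.dropWhile (fun x => x == h) := by
              rw [List.takeWhile_append_dropWhile]; exact hp1t
            rcases List.mem_append.mp hmm with e | e
            · exact absurd (htw p.1 e) hph
            · exact e
          refine (ihmem p).mpr ⟨hp1d, ?_⟩
          rw [hp2, hcount_gt p.1 (hlt p.1 hp1d)]

-- ===== VERDICT (by name: the statement is the Claim_ definition above) =====
theorem countColor_spec : Claim_equal_countColor := by
  intro color _
  unfold Spec_countColor countColor countColor_alt
  simp only []
  set lst := (PySem.Str.split? color "-").getD [] with hlst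
  set s := PySem.List.sorted lst (fun x => x) with hsdef
  refine Prod.ext ?_ rfl
  show PySem.List.sorted2 (List.foldl _ PySem.Dict.empty lst).items
      (fun p => p.1) (fun p => p.2) = pvRuns s
  rw [pv_dict_eq lst, PySem.Dict.items_counter]
  have hnod : (PySem.Set.ofList lst).Nodup := PySem.Set.nodup_ofList lst
  have hinj : ∀ a ∈ (PySem.Set.ofList lst).map (fun k => (k, (List.count k lst : Int))),
      ∀ b ∈ (PySem.Set.ofList lst).map (fun k => (k, (List.count k lst : Int))),
      a.1 = b.1 → a = b := by
    intro a ha b hb hab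
    obtain ⟨ka, _, rfl⟩ := List.mem_map.mp ha
    obtain ⟨kb, _, rfl⟩ := List.mem_map.mp hb
    simp only at hab
    rw [hab]
  rw [pv_sorted2_eq_sorted _ hinj]
  have hs_pair : s.Pairwise (· ≤ ·) := PySem.List.sorted_pairwise lst (fun x => x)
  obtain ⟨hpw, hmem⟩ := pv_runs_spec s hs_pair
  have hcnt : ∀ k : String, List.count k s = List.count k lst :=
    fun k => (PySem.List.sorted_perm lst (fun x => x) false).count_eq k
  have hperm : (pvRuns s).Perm ((PySem.Set.ofList lst).map (fun k => (k, (List.count k lst : Int)))) := by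
    rw [List.perm_ext_iff_of_nodup
      (hpw.imp (fun {a b} hab => by exact fun e => absurd (congrArg Prod.fst e) (ne_of_lt hab)))
      (hnod.map fun a b e => congrArg Prod.fst e)]
    intro p
    rw [hmem p, List.mem_map]
    constructor
    · rintro ⟨hp1, hp2⟩
      refine ⟨p.1, (PySem.Set.mem_ofList lst p.1).mpr ((PySem.List.mem_sorted lst _ false p.1).mp hp1), ?_⟩
      calc (p.1, (List.count p.1 lst : Int)) = (p.1, (List.count p.1 s : Int)) := by rw [hcnt]
      _ = (p.1, p.2) := by rw [hp2]
      _ = p := rfl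
    · rintro ⟨k, hk, rfl⟩
      have hks : k ∈ s := (PySem.List.mem_sorted lst _ false k).mpr ((PySem.Set.mem_ofList lst k).mp hk)
      exact ⟨hks, by rw [hcnt]⟩
  exact PySem.List.sorted_eq_of_perm_of_pairwise_lt _ _ _ hperm hpw
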